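-- pv_equiv track=rewrite | github.com/davidesantoro91/aiPhotoSearch | app.py | parse_boolean
-- ===== SOURCE A (Python) =====
-- def parse_boolean(query: str):
--     # Very simple parser: returns (pos_terms_groups, neg_terms)
--     # Supports: AND, OR, NOT
--     # Example: "cavallo AND spiaggia NOT notte OR corsa"
--     # We split by OR into groups, inside each group AND is enforced.
--     if not query:
--         return [[]], []
--     q = query.replace(" and ", " AND ").replace(" or ", " OR ").replace(" not ", " NOT ")
--     tokens = q.split()
--     groups = []
--     current = []
--     neg = []
--     i = 0
--     while i < len(tokens):
--         t = tokens[i]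
--         if t == "OR":
--             if current:
--                 groups.append(current)
--                 current = []
--         elif t == "AND":
--             pass
--         elif t == "NOT":
--             i += 1
--             if i < len(tokens):
--                 neg.append(tokens[i])
--         else:
--             current.append(t)
--         i += 1
--     if current:
--         groups.append(current)
--     if not groups:
--         groups = [[]]
--     return groups, neg
-- ===== SOURCE B (Python) =====
-- def _strip_not(tokens):
--     # stage 1: remove each NOT together with the token it consumes (-> neg)
--     if not tokens:
--         return [], []
--     if tokens[0] == "NOT":
--         if len(tokens) == 1:
--             return [], []
--         kept, neg = _strip_not(tokens[2:])
--         return kept, [tokens[1]] + neg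
--     kept, neg = _strip_not(tokens[1:])
--     return [tokens[0]] + kept, neg
--
--
-- def _split_or(tokens):
--     # stage 2: split the NOT-free token list on "OR", keeping empty segments
--     if not tokens:
--         return [[]]
--     if tokens[0] == "OR":
--         return [[]] + _split_or(tokens[1:])
--     segs = _split_or(tokens[1:])
--     return [[tokens[0]] + segs[0]] + segs[1:]
--
--
-- def parse_boolean(query: str):
--     # staged: strip NOT pairs, split on OR, filter AND, drop empty groups
--     if not query:
--         return [[]], []
--     q = query.replace(" and ", " AND ").replace(" or ", " OR ").replace(" not ", " NOT ")
--     kept, neg = _strip_not(q.split())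
--     groups = [g for g in ([t for t in seg if t != "AND"] for seg in _split_or(kept)) if g]
--     return (groups if groups else [[]]), neg
-- ===== Notes on version B (the rewrite author's own statement) =====
-- stated objective: alternative
-- what changed: Replaced A's single accumulator while-loop with index lookahead by three staged passes: a recursive pass that strips each NOT with the token it consumes into the negatives, a recursive split of the remaining tokens on OR into segments, and a comprehension that filters out AND and drops empty segments.
import Mathlib
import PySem

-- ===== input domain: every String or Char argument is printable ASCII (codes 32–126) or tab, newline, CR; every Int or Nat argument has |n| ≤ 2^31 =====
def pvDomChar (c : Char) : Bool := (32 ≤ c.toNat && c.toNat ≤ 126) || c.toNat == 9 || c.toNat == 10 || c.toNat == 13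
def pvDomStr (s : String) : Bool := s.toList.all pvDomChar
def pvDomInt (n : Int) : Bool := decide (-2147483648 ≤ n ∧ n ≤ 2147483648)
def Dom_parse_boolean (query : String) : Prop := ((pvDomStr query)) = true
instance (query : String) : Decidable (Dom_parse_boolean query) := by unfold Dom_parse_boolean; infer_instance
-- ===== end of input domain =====

-- B replaces A's single accumulator loop by three staged passes (strip NOT pairs,
-- split on OR, filter AND / drop empty groups); objective: alternative decomposition.

-- ===== PORT A =====
-- A's while loop with index i, ported as recursion on the remaining token list;
-- the NOT branch consumes the following token (two tokens in one step), like i += 1 twice.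
def pbLoopA : List String → List (List String) → List String → List String →
    List (List String) × List String × List String
  | [], groups, current, neg => (groups, current, neg)
  | t :: rest, groups, current, neg =>
    if t = "OR" then
      if current.isEmpty then pbLoopA rest groups current neg
      else pbLoopA rest (groups ++ [current]) [] neg
    else if t = "AND" then pbLoopA rest groups current neg
    else if t = "NOT" then
      match rest with
      | next :: rest' => pbLoopA rest' groups current (neg ++ [next])
      | [] => (groups, current, neg)
    else pbLoopA rest groups (current ++ [t]) neg

-- after the loop: append current if non-empty, default groups to [[]]
def pbFinishA (r : List (List String) × List String × List String) :
    List (List String) × List String :=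
  let groups := if r.2.1.isEmpty then r.1 else r.1 ++ [r.2.1]
  (if groups.isEmpty then [[]] else groups, r.2.2)

def parse_boolean (query : String) : List (List String) × List String :=
  if query = "" then ([[]], []) else
  pbFinishA (pbLoopA (PySem.Str.split₀ (PySem.Str.replace (PySem.Str.replace (PySem.Str.replace query " and " " AND ") " or " " OR ") " not " " NOT ")) [] [] [])

-- ===== PORT B =====
-- _strip_not: remove each NOT together with the token it consumes (that token goes to neg)
def stripNot : List String → List String × List String
  | [] => ([], [])
  | t :: rest =>
    if t = "NOT" then
      match rest with
      | [] => ([], [])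
      | nxt :: rest' => let p := stripNot rest'; (p.1, nxt :: p.2)
    else
      let p := stripNot rest; (t :: p.1, p.2)

-- _split_or: split the NOT-free token list on "OR", keeping empty segments
def splitOr : List String → List (List String)
  | [] => [[]]
  | t :: rest =>
    if t = "OR" then [] :: splitOr rest
    else
      match splitOr rest with
      | [] => [[t]]          -- unreachable: splitOr never returns []
      | s0 :: r => (t :: s0) :: r

def parse_boolean_alt (query : String) : List (List String) × List String :=
  if query = "" then ([[]], []) else
  let p := stripNot (PySem.Str.split₀ (PySem.Str.replace (PySem.Str.replace (PySem.Str.replace query " and " " AND ") " or " " OR ") " not " " NOT "))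
  let groups := ((splitOr p.1).map (fun seg => seg.filter (fun t => t != "AND"))).filter (fun g => !g.isEmpty)
  ((if groups.isEmpty then [[]] else groups), p.2)

-- ===== PRECONDITION & SPEC =====
def Spec_parse_boolean (query : String) (out : List (List String) × List String) : Prop := out = parse_boolean_alt query
instance (query : String) (out : List (List String) × List String) : Decidable (Spec_parse_boolean query out) := by unfold Spec_parse_boolean; infer_instance

-- ===== CLAIM (what is proved, stated in full; the proofs are below) =====
def Claim_equal_parse_boolean : Prop := ∀ (query : String), Dom_parse_boolean query → Spec_parse_boolean query (parse_boolean query)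

-- ===== LEMMAS AND PROOFS =====

-- A's loop restricted to OR/AND/term tokens (the NOT-free residue of stripNot)
def loopK : List String → List (List String) → List String → List (List String) × List String
  | [], g, c => (g, c)
  | t :: rest, g, c =>
    if t = "OR" then (if c.isEmpty then loopK rest g [] else loopK rest (g ++ [c]) [])
    else if t = "AND" then loopK rest g c
    else loopK rest g (c ++ [t])

-- B's group computation with a pending current c prefixed to the first segment
def segsOut (c : List String) (k : List String) : List (List String) :=
  match splitOr k with
  | [] => []
  | s0 :: rest =>
      ((c ++ s0.filter (fun t => t != "AND")) ::
        rest.map (fun seg => seg.filter (fun t => t != "AND"))).filter (fun g => !g.isEmpty)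

theorem splitOr_ne_nil (k : List String) : splitOr k ≠ [] := by
  cases k with
  | nil => simp [splitOr]
  | cons t rest =>
      by_cases h : t = "OR"
      · simp [splitOr, h]
      · cases hs : splitOr rest <;> simp [splitOr, h, hs]

theorem segsOut_nil (c : List String) :
    segsOut c [] = if c.isEmpty then [] else [c] := by
  cases c <;> simp [segsOut, splitOr]

theorem segsOut_nil_left (k : List String) :
    segsOut [] k =
      ((splitOr k).map (fun seg => seg.filter (fun t => t != "AND"))).filter
        (fun g => !g.isEmpty) := by
  cases h : splitOr k with
  | nil => exact absurd h (splitOr_ne_nil k)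
  | cons s0 r => simp [segsOut, h]

theorem segsOut_or (c : List String) (rest : List String) :
    segsOut c ("OR" :: rest) = (if c.isEmpty then [] else [c]) ++ segsOut [] rest := by
  cases hs : splitOr rest with
  | nil => exact absurd hs (splitOr_ne_nil rest)
  | cons s0 r =>
      unfold segsOut
      simp only [splitOr, hs]
      cases c <;> simp

theorem segsOut_and (c : List String) (rest : List String) :
    segsOut c ("AND" :: rest) = segsOut c rest := by
  cases hs : splitOr rest with
  | nil => exact absurd hs (splitOr_ne_nil rest)
  | cons s0 r =>
      unfold segsOut
      simp only [splitOr, if_neg (by decide : ¬("AND" : String) = "OR"), hs]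
      simp [List.filter_cons]

theorem segsOut_term (c : List String) (t : String) (rest : List String)
    (hOR : t ≠ "OR") (hAND : t ≠ "AND") :
    segsOut c (t :: rest) = segsOut (c ++ [t]) rest := by
  cases hs : splitOr rest with
  | nil => exact absurd hs (splitOr_ne_nil rest)
  | cons s0 r =>
      unfold segsOut
      simp only [splitOr, if_neg hOR, hs]
      have ht : (t != "AND") = true := by simp [hAND]
      simp [ht, List.append_assoc]

-- A's loop factors through stripNot and the NOT-free loop
theorem pbLoopA_strip (tokens : List String) :
    ∀ g c n, pbLoopA tokens g c n =
      ((loopK (stripNot tokens).1 g c).1, (loopK (stripNot tokens).1 g c).2,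
        n ++ (stripNot tokens).2) := by
  induction tokens using stripNot.induct with
  | case1 => intro g c n; simp [pbLoopA, stripNot, loopK]
  | case2 => intro g c n; simp [pbLoopA, stripNot, loopK]
  | case3 nxt rest' ih =>
      intro g c n
      have e : pbLoopA ("NOT" :: nxt :: rest') g c n = pbLoopA rest' g c (n ++ [nxt]) := by
        simp [pbLoopA]
      rw [e, ih]
      simp [stripNot]
  | case4 t rest h ih =>
      intro g c n
      by_cases hOR : t = "OR"
      · subst hOR
        have e2 : stripNot ("OR" :: rest) = ("OR" :: (stripNot rest).1, (stripNot rest).2) := by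
          rw [stripNot.eq_def]; simp
        rw [e2]
        by_cases hc : c.isEmpty
        · have hc' : c = [] := List.isEmpty_iff.mp hc
          subst hc'
          have e : pbLoopA ("OR" :: rest) g [] n = pbLoopA rest g [] n := by
            rw [pbLoopA.eq_def]; simp
          have eK : loopK ("OR" :: (stripNot rest).1) g [] = loopK (stripNot rest).1 g [] := by
            rw [loopK.eq_def]; simp
          rw [e, ih, eK]
        · have e : pbLoopA ("OR" :: rest) g c n = pbLoopA rest (g ++ [c]) [] n := by
            rw [pbLoopA.eq_def]; simp [hc]
          have eK : loopK ("OR" :: (stripNot rest).1) g c = loopK (stripNot rest).1 (g ++ [c]) [] := by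
            rw [loopK.eq_def]; simp [hc]
          rw [e, ih, eK]
      · by_cases hAND : t = "AND"
        · subst hAND
          have e2 : stripNot ("AND" :: rest) = ("AND" :: (stripNot rest).1, (stripNot rest).2) := by
            rw [stripNot.eq_def]; simp
          have e : pbLoopA ("AND" :: rest) g c n = pbLoopA rest g c n := by
            rw [pbLoopA.eq_def]; simp
          have eK : loopK ("AND" :: (stripNot rest).1) g c = loopK (stripNot rest).1 g c := by
            rw [loopK.eq_def]; simp
          rw [e2, e, ih, eK]
        · have e2 : stripNot (t :: rest) = (t :: (stripNot rest).1, (stripNot rest).2) := by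
            rw [stripNot.eq_def]; simp [h]
          have e : pbLoopA (t :: rest) g c n = pbLoopA rest g (c ++ [t]) n := by
            rw [pbLoopA.eq_def]; simp [h, hOR, hAND]
          have eK : loopK (t :: (stripNot rest).1) g c = loopK (stripNot rest).1 g (c ++ [t]) := by
            rw [loopK.eq_def]; simp [hOR, hAND]
          rw [e2, e, ih, eK]

-- flushing loopK's final current equals B's split/filter computation
theorem loopK_segsOut (k : List String) :
    ∀ g c, (if (loopK k g c).2.isEmpty then (loopK k g c).1
            else (loopK k g c).1 ++ [(loopK k g c).2]) = g ++ segsOut c k := by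
  induction k with
  | nil =>
      intro g c
      rw [segsOut_nil]
      cases c <;> simp [loopK]
  | cons t rest ih =>
      intro g c
      by_cases hOR : t = "OR"
      · subst hOR
        rw [segsOut_or]
        by_cases hc : c.isEmpty
        · have hc' : c = [] := List.isEmpty_iff.mp hc
          subst hc'
          have e : loopK ("OR" :: rest) g [] = loopK rest g [] := by rw [loopK.eq_def]; simp
          rw [e, ih]
          simp
        · have e : loopK ("OR" :: rest) g c = loopK rest (g ++ [c]) [] := by
            rw [loopK.eq_def]; simp [hc]
          rw [e, ih, if_neg hc]
          simp [List.append_assoc]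
      · by_cases hAND : t = "AND"
        · subst hAND
          rw [segsOut_and]
          have e : loopK ("AND" :: rest) g c = loopK rest g c := by rw [loopK.eq_def]; simp
          rw [e, ih]
        · rw [segsOut_term c t rest hOR hAND]
          have e : loopK (t :: rest) g c = loopK rest g (c ++ [t]) := by
            rw [loopK.eq_def]; simp [hOR, hAND]
          rw [e, ih]

-- ===== VERDICT (by name: the statement is the Claim_ definition above) =====
theorem parse_boolean_spec : Claim_equal_parse_boolean := by
  intro query _
  unfold Spec_parse_boolean parse_boolean parse_boolean_alt
  split
  · rfl
  · generalize (PySem.Str.split₀ (PySem.Str.replace (PySem.Str.replace (PySem.Str.replace query " and " " AND ") " or " " OR ") " not " " NOT ")) = toks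
    rw [pbLoopA_strip]
    have h2 := loopK_segsOut (stripNot toks).1 [] []
    rw [List.nil_append, segsOut_nil_left] at h2
    simp only [pbFinishA, List.nil_append]
    rw [h2]
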